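-- pv_equiv track=rewrite | github.com/m4gnum-opus/univalence-gravity | sim/prototyping/01_happy_patch_cuts.py | tile_aligned_regions
-- ===== SOURCE A (Python) =====
-- def tile_aligned_regions(
--     groups: list[tuple[str, int]],
-- ) -> list[tuple[str, set[int]]]:
--     """
--     Enumerate all nonempty proper contiguous tile-aligned regions.
--
--     Returns a list of (human_label, set_of_leg_indices) pairs.
--     Each tile-aligned region is a consecutive subsequence of boundary
--     groups (cyclic).
--     """
--     n_groups = len(groups)
--     # Build mapping: group index  →  (tile_name, start_leg, end_leg)
--     offsets: list[tuple[str, int, int]] = []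
--     leg = 0
--     for tile, n_legs in groups:
--         offsets.append((tile, leg, leg + n_legs))
--         leg += n_legs
--     total_legs = leg
--
--     results: list[tuple[str, set[int]]] = []
--
--     for length in range(1, n_groups):  # exclude full boundary
--         for start in range(n_groups):
--             tiles_in_region: list[str] = []
--             indices: set[int] = set()
--             for k in range(length):
--                 g = (start + k) % n_groups
--                 tile, lo, hi = offsets[g]
--                 tiles_in_region.append(tile)
--                 for idx in range(lo, hi):
--                     indices.add(idx)
--             label = "{" + ", ".join(tiles_in_region) + "}"
--             results.append((label, indices))
--
--     return results
-- ===== SOURCE B (Python) =====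
-- def tile_aligned_regions(
--     groups: list[tuple[str, int]],
-- ) -> list[tuple[str, set[int]]]:
--     """Same result as A, by a different decomposition: one scan per start
--     that grows the label list and the list of leg-range bounds by a single
--     group per step, then a length-major transposition of the rows."""
--     n = len(groups)
--     offsets = []
--     leg = 0
--     for tile, n_legs in groups:
--         offsets.append((tile, leg, leg + n_legs))
--         leg += n_legs
--
--     def row(start):
--         labels, bounds, out = [], [], []
--         for L in range(1, n):
--             tile, lo, hi = offsets[(start + L - 1) % n]
--             labels.append(tile)
--             bounds.append((lo, hi))
--             idxs = set()
--             for lo2, hi2 in bounds: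
--                 idxs.update(range(lo2, hi2))
--             out.append(("{" + ", ".join(labels) + "}", idxs))
--         return out
--
--     per_start = [row(s) for s in range(n)]
--     return [per_start[s][L - 1] for L in range(1, n) for s in range(n)]
-- ===== Notes on version B (the rewrite author's own statement) =====
-- stated objective: alternative
-- what changed: Replaces the length-major triple loop that re-walks the cyclic group window for every (length, start) pair by one incremental scan per start (labels and leg-range bounds grow by a single group per step) followed by a length-major transposition of the per-start rows.
import Mathlib
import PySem

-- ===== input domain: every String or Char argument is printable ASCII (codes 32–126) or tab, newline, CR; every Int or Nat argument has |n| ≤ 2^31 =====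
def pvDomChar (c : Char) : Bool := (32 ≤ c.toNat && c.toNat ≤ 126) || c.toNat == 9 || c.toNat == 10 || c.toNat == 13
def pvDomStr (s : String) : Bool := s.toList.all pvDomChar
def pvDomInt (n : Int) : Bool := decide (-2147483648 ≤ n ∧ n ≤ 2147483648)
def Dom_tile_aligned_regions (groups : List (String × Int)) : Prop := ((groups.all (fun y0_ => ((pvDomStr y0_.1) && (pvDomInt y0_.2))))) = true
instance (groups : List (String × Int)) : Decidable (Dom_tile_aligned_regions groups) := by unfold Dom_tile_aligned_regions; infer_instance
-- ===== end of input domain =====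

-- B replaces A's length-major triple loop (which re-walks the whole cyclic window per
-- (length, start)) by one incremental scan per start plus a length-major transposition.

-- shared helper: both Pythons build the (tile, start_leg, end_leg) offsets with this loop
def buildOffsets (groups : List (String × Int)) : List (String × Int × Int) :=
  (groups.foldl (fun (st : List (String × Int × Int) × Int) g =>
      (st.1 ++ [(g.1, st.2, st.2 + g.2)], st.2 + g.2)) ([], 0)).1

-- ===== PORT A =====
-- A's innermost k-loop: build (tiles, indices) of the region [start, start+length)
def regionA (offsets : List (String × Int × Int)) (n start length : Int) :
    List String × List Int :=
  (PySem.List.pyRange 0 length 1).foldl (fun acc k =>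
    match PySem.List.pyGet? offsets (PySem.Int.mod (start + k) n) with
    | some tlh =>
        (acc.1 ++ [tlh.1],
         (PySem.List.pyRange tlh.2.1 tlh.2.2 1).foldl
           (fun s idx => PySem.Set.add s idx) acc.2)
    | none => acc) ([], [])

def tile_aligned_regions (groups : List (String × Int)) : List (String × List Int) :=
  let n : Int := groups.length
  let offsets := buildOffsets groups
  (PySem.List.pyRange 1 n 1).foldl (fun results length =>
    (PySem.List.pyRange 0 n 1).foldl (fun results start =>
      let r := regionA offsets n start length
      results ++ [("{" ++ PySem.Str.join ", " r.1 ++ "}", r.2)]) results) []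

-- ===== PORT B =====
-- B's per-entry index set: fresh set filled from the accumulated (lo, hi) bounds
def buildIdx (bs : List (Int × Int)) : List Int :=
  bs.foldl (fun s p => (PySem.List.pyRange p.1 p.2 1).foldl
    (fun s idx => PySem.Set.add s idx) s) []

-- B's single-group extension step (grow labels and bounds by group (start+L-1) % n)
def stepB (offsets : List (String × Int × Int)) (n start L : Int)
    (st : List String × List (Int × Int)) : List String × List (Int × Int) :=
  match PySem.List.pyGet? offsets (PySem.Int.mod (start + L - 1) n) with
  | some tlh => (st.1 ++ [tlh.1], st.2 ++ [(tlh.2.1, tlh.2.2)])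
  | none => st

-- B's 'row(start)': incremental scan over lengths 1..n-1
def rowB (offsets : List (String × Int × Int)) (n start : Int) :
    List (String × List Int) :=
  ((PySem.List.pyRange 1 n 1).foldl
    (fun (st : (List String × List (Int × Int)) × List (String × List Int)) L =>
      let st1 := stepB offsets n start L st.1
      (st1, st.2 ++ [("{" ++ PySem.Str.join ", " st1.1 ++ "}", buildIdx st1.2)]))
    (([], []), [])).2

def tile_aligned_regions_alt (groups : List (String × Int)) : List (String × List Int) :=
  let n : Int := groups.length
  let offsets := buildOffsets groups
  let per_start := (PySem.List.pyRange 0 n 1).map (fun s => rowB offsets n s)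
  (PySem.List.pyRange 1 n 1).foldl (fun out L =>
    (PySem.List.pyRange 0 n 1).foldl (fun out s =>
      match (PySem.List.pyGet? per_start s).bind
              (fun row => PySem.List.pyGet? row (L - 1)) with
      | some r => out ++ [r]
      | none => out) out) []

-- ===== PRECONDITION & SPEC =====
def Spec_tile_aligned_regions (groups : List (String × Int)) (out : List (String × List Int)) : Prop := out = tile_aligned_regions_alt groups
instance (groups : List (String × Int)) (out : List (String × List Int)) : Decidable (Spec_tile_aligned_regions groups out) := by unfold Spec_tile_aligned_regions; infer_instance

-- ===== CLAIM (what is proved, stated in full; the proofs are below) =====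
def Claim_equal_tile_aligned_regions : Prop := ∀ (groups : List (String × Int)), Dom_tile_aligned_regions groups → Spec_tile_aligned_regions groups (tile_aligned_regions groups)

-- ===== LEMMAS AND PROOFS =====

-- the (label, set) pair both programs emit for the region [start, start+L)
def entryOf (offsets : List (String × Int × Int)) (n start L : Int) :
    String × List Int :=
  ("{" ++ PySem.Str.join ", " (regionA offsets n start L).1 ++ "}",
   (regionA offsets n start L).2)

-- proof-side spec of B's scan state at length L: the labels and bounds of the window
def tbOf (offsets : List (String × Int × Int)) (n start L : Int) :
    List String × List (Int × Int) :=
  (PySem.List.pyRange 0 L 1).foldl (fun acc k =>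
    match PySem.List.pyGet? offsets (PySem.Int.mod (start + k) n) with
    | some tlh => (acc.1 ++ [tlh.1], acc.2 ++ [(tlh.2.1, tlh.2.2)])
    | none => acc) ([], [])

-- A's on-the-fly set accumulation equals a fresh buildIdx over the collected bounds
theorem combo (offsets : List (String × Int × Int)) (n start : Int) :
    ∀ (ks : List Int) (ls : List String) (bs : List (Int × Int)),
    ks.foldl (fun acc k =>
      match PySem.List.pyGet? offsets (PySem.Int.mod (start + k) n) with
      | some tlh =>
          (acc.1 ++ [tlh.1],
           (PySem.List.pyRange tlh.2.1 tlh.2.2 1).foldl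
             (fun s idx => PySem.Set.add s idx) acc.2)
      | none => acc) (ls, buildIdx bs)
    = ((ks.foldl (fun acc k =>
        match PySem.List.pyGet? offsets (PySem.Int.mod (start + k) n) with
        | some tlh => (acc.1 ++ [tlh.1], acc.2 ++ [(tlh.2.1, tlh.2.2)])
        | none => acc) (ls, bs)).1,
       buildIdx (ks.foldl (fun acc k =>
        match PySem.List.pyGet? offsets (PySem.Int.mod (start + k) n) with
        | some tlh => (acc.1 ++ [tlh.1], acc.2 ++ [(tlh.2.1, tlh.2.2)])
        | none => acc) (ls, bs)).2) := by
  intro ks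
  induction ks with
  | nil => intro ls bs; simp
  | cons k ks ih =>
    intro ls bs
    simp only [List.foldl_cons]
    cases h : PySem.List.pyGet? offsets (PySem.Int.mod (start + k) n) with
    | none => dsimp only; exact ih ls bs
    | some tlh =>
      dsimp only
      have hb : (PySem.List.pyRange tlh.2.1 tlh.2.2 1).foldl
          (fun s idx => PySem.Set.add s idx) (buildIdx bs)
          = buildIdx (bs ++ [(tlh.2.1, tlh.2.2)]) := by
        simp [buildIdx, List.foldl_append]
      rw [hb]
      exact ih (ls ++ [tlh.1]) (bs ++ [(tlh.2.1, tlh.2.2)])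

theorem regionA_eq_tb (offsets : List (String × Int × Int)) (n start L : Int) :
    regionA offsets n start L
      = ((tbOf offsets n start L).1, buildIdx (tbOf offsets n start L).2) := by
  have := combo offsets n start (PySem.List.pyRange 0 L 1) [] []
  simpa [regionA, tbOf, buildIdx] using this

-- the entry B emits from its state at length L is A's entry for that region
theorem entry_eq (offsets : List (String × Int × Int)) (n start L : Int) :
    ("{" ++ PySem.Str.join ", " (tbOf offsets n start L).1 ++ "}",
      buildIdx (tbOf offsets n start L).2) = entryOf offsets n start L := by
  rw [entryOf, regionA_eq_tb]

-- one more group: the state at length L is the L-step extension of the state at L-1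
theorem tb_succ (offsets : List (String × Int × Int)) (n start L : Int)
    (hL : 1 ≤ L) :
    tbOf offsets n start L = stepB offsets n start L (tbOf offsets n start (L - 1)) := by
  unfold tbOf stepB
  have h : PySem.List.pyRange 0 L 1
      = PySem.List.pyRange 0 (L - 1) 1 ++ [L - 1] := by
    have := PySem.List.pyRange_one_succ_right (a := 0) (b := L - 1) (by omega)
    simpa [sub_add_cancel] using this
  rw [h, List.foldl_append]
  simp only [List.foldl_cons, List.foldl_nil]
  have : start + (L - 1) = start + L - 1 := by ring
  rw [this]

-- the scan invariant: folding B's row body over lengths m..n-1, starting from the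
-- state of length m-1, appends exactly the entries for lengths m..n-1
theorem rowB_inv (offsets : List (String × Int × Int)) (n start : Int) :
    ∀ (k : Nat) (m : Int) (out : List (String × List Int)), 1 ≤ m → (n - m).toNat = k →
    ((PySem.List.pyRange m n 1).foldl
      (fun (st : (List String × List (Int × Int)) × List (String × List Int)) L =>
        let st1 := stepB offsets n start L st.1
        (st1, st.2 ++ [("{" ++ PySem.Str.join ", " st1.1 ++ "}", buildIdx st1.2)]))
      ((tbOf offsets n start (m - 1)), out)).2
    = out ++ (PySem.List.pyRange m n 1).map (fun L => entryOf offsets n start L) := by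
  intro k
  induction k with
  | zero =>
    intro m out hm hk
    rw [PySem.List.pyRange_one_eq_nil (by omega)]
    simp
  | succ k ih =>
    intro m out hm hk
    rw [PySem.List.pyRange_one_cons (by omega)]
    simp only [List.foldl_cons, List.map_cons]
    have hstep : stepB offsets n start m (tbOf offsets n start (m - 1))
        = tbOf offsets n start m := (tb_succ offsets n start m hm).symm
    rw [hstep]
    have hm1 : tbOf offsets n start m = tbOf offsets n start (m + 1 - 1) := by
      norm_num
    rw [hm1]
    rw [ih (m + 1) _ (by omega) (by omega)]
    rw [show (m + 1 - 1 : Int) = m by ring, entry_eq offsets n start m]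
    simp [List.append_assoc]

theorem rowB_eq (offsets : List (String × Int × Int)) (n start : Int) :
    rowB offsets n start
      = (PySem.List.pyRange 1 n 1).map (fun L => entryOf offsets n start L) := by
  unfold rowB
  have h0 : (([], []) : List String × List (Int × Int)) = tbOf offsets n start (1 - 1) := by
    simp [tbOf, PySem.List.pyRange]
  rw [h0, rowB_inv offsets n start (n - 1).toNat 1 [] le_rfl rfl]
  simp

-- indexing a mapped range: ((pyRange a b 1).map f)[i - a] = f i for a ≤ i < b
theorem pyGet?_map_pyRange_mid {α : Type} (f : Int → α) (a b i : Int)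
    (ha : a ≤ i) (hb : i < b) :
    PySem.List.pyGet? ((PySem.List.pyRange a b 1).map f) (i - a) = some (f i) := by
  have h1 : i - a = (((i - a).toNat : Nat) : Int) := by omega
  rw [h1, PySem.List.pyGet?_natCast]
  have hlen : (i - a).toNat < ((PySem.List.pyRange a b 1).map f).length := by
    simp [PySem.List.length_pyRange_one]; omega
  rw [List.getElem?_eq_getElem hlen]
  rw [List.getElem_map, PySem.List.getElem_pyRange_one]
  have : a + (((i - a).toNat : Nat) : Int) = i := by omega
  rw [this]

-- resolving B's double indexing: per_start[s][L-1] is the entry for (start = s, length = L)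
theorem lookup_eq (offsets : List (String × Int × Int)) (n s L : Int)
    (hs0 : 0 ≤ s) (hsn : s < n) (hL1 : 1 ≤ L) (hLn : L < n) :
    (PySem.List.pyGet? ((PySem.List.pyRange 0 n 1).map (fun t => rowB offsets n t)) s).bind
      (fun row => PySem.List.pyGet? row (L - 1))
    = some (entryOf offsets n s L) := by
  have h1 : PySem.List.pyGet? ((PySem.List.pyRange 0 n 1).map (fun t => rowB offsets n t)) s
      = some (rowB offsets n s) := by
    have := pyGet?_map_pyRange_mid (fun t => rowB offsets n t) 0 n s hs0 hsn
    simpa using this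
  rw [h1]
  show PySem.List.pyGet? (rowB offsets n s) (L - 1) = some (entryOf offsets n s L)
  rw [rowB_eq]
  exact pyGet?_map_pyRange_mid (fun L => entryOf offsets n s L) 1 n L hL1 hLn

-- ===== VERDICT (by name: the statement is the Claim_ definition above) =====
theorem tile_aligned_regions_spec : Claim_equal_tile_aligned_regions := by
  intro groups _
  show tile_aligned_regions groups = tile_aligned_regions_alt groups
  simp only [tile_aligned_regions, tile_aligned_regions_alt]
  set n : Int := (groups.length : Int) with hn
  set offsets := buildOffsets groups with hoffs
  have hA : (PySem.List.pyRange 1 n 1).foldl (fun results length =>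
      (PySem.List.pyRange 0 n 1).foldl (fun results start =>
        let r := regionA offsets n start length
        results ++ [("{" ++ PySem.Str.join ", " r.1 ++ "}", r.2)]) results) []
      = (PySem.List.pyRange 1 n 1).flatMap (fun L =>
          (PySem.List.pyRange 0 n 1).map (fun s => entryOf offsets n s L)) := by
    have inner : ∀ (L : Int) (acc : List (String × List Int)),
        (PySem.List.pyRange 0 n 1).foldl (fun results start =>
          let r := regionA offsets n start L
          results ++ [("{" ++ PySem.Str.join ", " r.1 ++ "}", r.2)]) acc
        = acc ++ (PySem.List.pyRange 0 n 1).map (fun s => entryOf offsets n s L) := by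
      intro L acc
      exact PySem.List.foldl_append_singleton_eq_map
        (f := fun s => entryOf offsets n s L) (l := PySem.List.pyRange 0 n 1) (acc := acc)
    calc (PySem.List.pyRange 1 n 1).foldl _ []
        = (PySem.List.pyRange 1 n 1).foldl (fun results L =>
            results ++ (PySem.List.pyRange 0 n 1).map (fun s => entryOf offsets n s L)) [] := by
          refine PySem.List.foldl_congr_mem _ _ _ _ ?_
          intro acc L _
          exact inner L acc
      _ = _ := by
          simpa using PySem.List.foldl_append_eq_flatMap
            (g := fun L => (PySem.List.pyRange 0 n 1).map (fun s => entryOf offsets n s L))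
            (l := PySem.List.pyRange 1 n 1) (acc := [])
  have hB : (PySem.List.pyRange 1 n 1).foldl (fun out L =>
      (PySem.List.pyRange 0 n 1).foldl (fun out s =>
        match (PySem.List.pyGet? ((PySem.List.pyRange 0 n 1).map (fun t => rowB offsets n t)) s).bind
                (fun row => PySem.List.pyGet? row (L - 1)) with
        | some r => out ++ [r]
        | none => out) out) []
      = (PySem.List.pyRange 1 n 1).flatMap (fun L =>
          (PySem.List.pyRange 0 n 1).map (fun s => entryOf offsets n s L)) := by
    have inner : ∀ (L : Int), 1 ≤ L → L < n → ∀ (acc : List (String × List Int)),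
        (PySem.List.pyRange 0 n 1).foldl (fun out s =>
          match (PySem.List.pyGet? ((PySem.List.pyRange 0 n 1).map (fun t => rowB offsets n t)) s).bind
                  (fun row => PySem.List.pyGet? row (L - 1)) with
          | some r => out ++ [r]
          | none => out) acc
        = acc ++ (PySem.List.pyRange 0 n 1).map (fun s => entryOf offsets n s L) := by
      intro L hL1 hLn acc
      calc (PySem.List.pyRange 0 n 1).foldl _ acc
          = (PySem.List.pyRange 0 n 1).foldl
              (fun out s => out ++ [entryOf offsets n s L]) acc := by
            refine PySem.List.foldl_congr_mem _ _ _ _ ?_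
            intro acc' s hs
            rw [PySem.List.mem_pyRange_one] at hs
            rw [lookup_eq offsets n s L hs.1 hs.2 hL1 hLn]
        _ = _ := PySem.List.foldl_append_singleton_eq_map
              (f := fun s => entryOf offsets n s L) (l := PySem.List.pyRange 0 n 1) (acc := acc)
    calc (PySem.List.pyRange 1 n 1).foldl _ []
        = (PySem.List.pyRange 1 n 1).foldl (fun out L =>
            out ++ (PySem.List.pyRange 0 n 1).map (fun s => entryOf offsets n s L)) [] := by
          refine PySem.List.foldl_congr_mem _ _ _ _ ?_
          intro acc L hL
          rw [PySem.List.mem_pyRange_one] at hL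
          exact inner L hL.1 hL.2 acc
      _ = _ := by
          simpa using PySem.List.foldl_append_eq_flatMap
            (g := fun L => (PySem.List.pyRange 0 n 1).map (fun s => entryOf offsets n s L))
            (l := PySem.List.pyRange 1 n 1) (acc := [])
  rw [hA, hB]
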